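-- pv_equiv track=rewrite | github.com/prayas7102/pythoncoriolis | q12.py | solve
-- ===== SOURCE A (Python) =====
-- def generate_substrings(s, current="", index=0, result=None):
--     """
--     This function generates all substrings of a given string using recursion.
--
--     Parameters:
--         s (str): The original string
--         current (str): The current substring being generated
--         index (int): The index of the current character being considered
--         result (list): List to store the substrings
--
--     Returns:
--         list: All substrings of the original string
--     """
--     if result is None:
--         result = []
--
--     n = len(s)
--
--     if index == n:
--         result.append(current)
--         return result
--
--     generate_substrings(s, current, index + 1, result)
--     generate_substrings(s, current + s[index], index + 1, result)
--
--     return result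
--
-- def solve(input_string):
--     """ counts vowels and consonants in a tring and retuens a dict"""
--     substrings = generate_substrings(input_string)
--     ans = {}
--     ans["vowels"] = 0
--     ans["consonants"] = 0
--     for x in substrings:
--         if len(x) == 0:
--             continue
--         if x[0] in ["a", "e", "i", "o", "u"]:
--             ans["vowels"] += 1
--         else:
--             ans["consonants"] += 1
--     return ans
-- ===== SOURCE B (Python) =====
-- def solve(input_string):
--     """counts vowels and consonants by first char over all subsequences, in O(n)"""
--     n = len(input_string)
--     vowels = 0
--     consonants = 0
--     for i, ch in enumerate(input_string):
--         w = 1 << (n - 1 - i)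
--         if ch in "aeiou":
--             vowels += w
--         else:
--             consonants += w
--     return {"vowels": vowels, "consonants": consonants}
-- ===== Notes on version B (the rewrite author's own statement) =====
-- stated objective: faster
-- what changed: B replaces A's recursive enumeration of all 2^n subsequences (then counting first characters) by a single pass that adds the closed-form weight 2^(n-1-i) to the vowel or consonant total for each position i.
import Mathlib
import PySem

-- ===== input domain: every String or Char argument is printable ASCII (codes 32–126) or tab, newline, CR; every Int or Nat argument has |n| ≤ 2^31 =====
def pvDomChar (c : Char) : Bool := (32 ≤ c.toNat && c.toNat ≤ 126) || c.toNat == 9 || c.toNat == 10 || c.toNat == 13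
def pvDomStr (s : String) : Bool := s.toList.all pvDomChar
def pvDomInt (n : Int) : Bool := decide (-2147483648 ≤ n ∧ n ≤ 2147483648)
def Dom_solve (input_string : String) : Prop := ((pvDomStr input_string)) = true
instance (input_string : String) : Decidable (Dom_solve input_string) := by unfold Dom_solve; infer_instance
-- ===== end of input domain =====

-- B replaces A's enumeration of all 2^n subsequences by the closed-form weights 2^(n-1-i) per position (O(n) instead of O(2^n)).

-- ===== PORT A =====
-- generate_substrings: recursion over the remaining characters (index over s = structural recursion on the suffix)
def generate_substrings (rest : List Char) (current : List Char) : List (List Char) :=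
  match rest with
  | [] => [current]
  | c :: rs => generate_substrings rs current ++ generate_substrings rs (current ++ [c])

-- the loop body of solve's for-loop: ans["vowels"] += 1 / ans["consonants"] += 1 (keys always present)
def solveStep (ans : PySem.Dict String Int) (x : List Char) : PySem.Dict String Int :=
  match x with
  | [] => ans
  | c :: _ =>
    if ['a', 'e', 'i', 'o', 'u'].contains c then
      ans.insert "vowels" (ans.getD "vowels" 0 + 1)
    else
      ans.insert "consonants" (ans.getD "consonants" 0 + 1)

def solve (input_string : String) : List (String × Int) :=
  let substrings := generate_substrings input_string.toList []
  let ans := (PySem.Dict.empty.insert "vowels" (0 : Int)).insert "consonants" (0 : Int)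
  (substrings.foldl solveStep ans).items

-- ===== PORT B =====
def bIsVowel (c : Char) : Bool := "aeiou".toList.contains c

def solve_alt (input_string : String) : List (String × Int) :=
  let s := input_string.toList
  let n := s.length
  let r := (PySem.List.enumerate s).foldl
    (fun (acc : Int × Int) (p : Int × Char) =>
      let w : Int := 2 ^ ((n : Int) - 1 - p.1).toNat
      if bIsVowel p.2 then (acc.1 + w, acc.2) else (acc.1, acc.2 + w))
    (0, 0)
  [("vowels", r.1), ("consonants", r.2)]

-- ===== PRECONDITION & SPEC =====
def Spec_solve (input_string : String) (out : List (String × Int)) : Prop := out = solve_alt input_string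
instance (input_string : String) (out : List (String × Int)) : Decidable (Spec_solve input_string out) := by unfold Spec_solve; infer_instance

-- ===== CLAIM (what is proved, stated in full; the proofs are below) =====
def Claim_equal_solve : Prop := ∀ (input_string : String), Dom_solve input_string → Spec_solve input_string (solve input_string)

-- ===== LEMMAS AND PROOFS =====

-- a substring starts with a vowel / with a consonant (A skips the empty string in both counts)
def startsV (x : List Char) : Bool := match x with | [] => false | c :: _ => ['a','e','i','o','u'].contains c
def startsC (x : List Char) : Bool := match x with | [] => false | c :: _ => !(['a','e','i','o','u'].contains c)

-- position-weighted counts (Nat), the closed form B computes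
def wsumV : List Char → Nat
  | [] => 0
  | c :: rs => (if ['a','e','i','o','u'].contains c then 2 ^ rs.length else 0) + wsumV rs
def wsumC : List Char → Nat
  | [] => 0
  | c :: rs => (if ['a','e','i','o','u'].contains c then 0 else 2 ^ rs.length) + wsumC rs

theorem countP_gen_cons (rest : List Char) (c : Char) (cs : List Char) :
    (generate_substrings rest (c :: cs)).countP startsV
      = (if ['a','e','i','o','u'].contains c then 2 ^ rest.length else 0) ∧
    (generate_substrings rest (c :: cs)).countP startsC
      = (if ['a','e','i','o','u'].contains c then 0 else 2 ^ rest.length) := by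
  induction rest generalizing cs with
  | nil =>
    by_cases h : c = 'a' ∨ c = 'e' ∨ c = 'i' ∨ c = 'o' ∨ c = 'u' <;>
      simp [generate_substrings, startsV, startsC, h]
  | cons c' rs ih =>
    have h1 := ih cs
    have h2 := ih (cs ++ [c'])
    simp only [generate_substrings, List.countP_append, List.cons_append] at *
    rw [h1.1, h1.2, h2.1, h2.2]
    constructor <;> split <;> simp [pow_succ] <;> ring

theorem countP_gen_nil (rest : List Char) :
    (generate_substrings rest []).countP startsV = wsumV rest ∧
    (generate_substrings rest []).countP startsC = wsumC rest := by
  induction rest with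
  | nil => simp [generate_substrings, wsumV, wsumC, List.countP, List.countP.go, startsV, startsC]
  | cons c rs ih =>
    have h := countP_gen_cons rs c []
    simp only [generate_substrings, List.countP_append, List.nil_append] at *
    rw [ih.1, ih.2, h.1, h.2, wsumV, wsumC]
    constructor <;> split <;> ring

theorem foldl_solveStep (xs : List (List Char)) (v0 c0 : Int) :
    xs.foldl solveStep (PySem.Dict.mk [("vowels", v0), ("consonants", c0)])
      = PySem.Dict.mk [("vowels", v0 + (xs.countP startsV : Int)),
                       ("consonants", c0 + (xs.countP startsC : Int))] := by
  induction xs generalizing v0 c0 with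
  | nil => simp [List.countP, List.countP.go]
  | cons x t ih =>
    match x with
    | [] =>
      simp only [List.foldl_cons, solveStep, ih]
      simp [startsV, startsC]
    | c :: cs =>
      simp only [List.foldl_cons, solveStep]
      split
      · rename_i hv
        have : (PySem.Dict.mk [("vowels", v0), ("consonants", c0)]).insert "vowels"
            ((PySem.Dict.mk [("vowels", v0), ("consonants", c0)]).getD "vowels" 0 + 1)
            = PySem.Dict.mk [("vowels", v0 + 1), ("consonants", c0)] := by
          simp [PySem.Dict.insert, PySem.Dict.getD, PySem.Dict.get?, PySem.Dict.contains]
        have sv : startsV (c :: cs) = true := by simp only [startsV]; exact hv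
        have sc : startsC (c :: cs) = false := by simp only [startsC]; rw [hv]; rfl
        rw [this, ih]
        simp [sv, sc]; omega
      · rename_i hv
        have : (PySem.Dict.mk [("vowels", v0), ("consonants", c0)]).insert "consonants"
            ((PySem.Dict.mk [("vowels", v0), ("consonants", c0)]).getD "consonants" 0 + 1)
            = PySem.Dict.mk [("vowels", v0), ("consonants", c0 + 1)] := by
          simp [PySem.Dict.insert, PySem.Dict.getD, PySem.Dict.get?, PySem.Dict.contains]
        have hb : (['a','e','i','o','u'].contains c) = false := Bool.eq_false_iff.mpr hv
        have sv : startsV (c :: cs) = false := by simp only [startsV]; exact hb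
        have sc : startsC (c :: cs) = true := by simp only [startsC]; rw [hb]; rfl
        rw [this, ih]
        simp [sv, sc]; omega

-- B's enumerate-fold on a suffix t starting at absolute index k (k + |t| = n) sums the tails' weights
theorem foldl_enum (n : Nat) (t : List Char) (k : Int) (a b : Int)
    (h : k + t.length = (n : Int)) :
    (PySem.List.enumerate t k).foldl
      (fun (acc : Int × Int) (p : Int × Char) =>
        if bIsVowel p.2 then (acc.1 + 2 ^ ((n : Int) - 1 - p.1).toNat, acc.2)
        else (acc.1, acc.2 + 2 ^ ((n : Int) - 1 - p.1).toNat))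
      (a, b)
      = (a + (wsumV t : Int), b + (wsumC t : Int)) := by
  induction t generalizing k a b with
  | nil => simp [PySem.List.enumerate_nil, wsumV, wsumC]
  | cons c rs ih =>
    rw [PySem.List.enumerate_cons, List.foldl_cons]
    have hk : ((n : Int) - 1 - k).toNat = rs.length := by
      simp only [List.length_cons] at h; omega
    have hv : bIsVowel c = ['a','e','i','o','u'].contains c := by
      simp [bIsVowel]
    simp only [hk, hv]
    split
    · rename_i hc
      rw [ih (k + 1) _ _ (by simp only [List.length_cons] at h ⊢; omega)]
      have e1 : wsumV (c :: rs) = 2 ^ rs.length + wsumV rs := by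
        simp only [wsumV]; rw [if_pos hc]
      have e2 : wsumC (c :: rs) = wsumC rs := by
        simp only [wsumC]; rw [if_pos hc]; omega
      rw [e1, e2]
      push_cast
      simp only [Prod.mk.injEq]
      exact ⟨by ring, by trivial⟩
    · rename_i hc
      rw [ih (k + 1) _ _ (by simp only [List.length_cons] at h ⊢; omega)]
      have e1 : wsumV (c :: rs) = wsumV rs := by
        simp only [wsumV]; rw [if_neg hc]; omega
      have e2 : wsumC (c :: rs) = 2 ^ rs.length + wsumC rs := by
        simp only [wsumC]; rw [if_neg hc]
      rw [e1, e2]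
      push_cast
      simp only [Prod.mk.injEq]
      exact ⟨by trivial, by ring⟩

-- ===== VERDICT (by name: the statement is the Claim_ definition above) =====
theorem solve_spec : Claim_equal_solve := by
  intro s _
  unfold Spec_solve solve solve_alt
  dsimp only
  have hinit : (PySem.Dict.empty.insert "vowels" (0 : Int)).insert "consonants" (0 : Int)
      = PySem.Dict.mk [("vowels", 0), ("consonants", 0)] := rfl
  rw [hinit, foldl_solveStep, (countP_gen_nil s.toList).1, (countP_gen_nil s.toList).2,
      foldl_enum s.toList.length s.toList 0 0 0 (by simp)]
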